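-- pv_equiv track=rewrite | github.com/kimt33/fanpy | wfns/upgrades/temp/sign.py | sign_excite_two_ab
-- ===== SOURCE A (Python) =====
-- def sign_excite_two_ab(occ_alpha, occ_beta, vir_alpha, vir_beta):
--     num_occ_alpha = len(occ_alpha)
--     num_occ_beta = len(occ_beta)
--
--     bins_alpha = [[] for j in range(num_occ_alpha + 1)]
--     bins_beta = [[] for j in range(num_occ_beta + 1)]
--     # assume occ_alpha, vir_alpha, occ_beta, vir_beta are ordered
--
--     counter = 0
--     for a in vir_alpha:
--         while counter < num_occ_alpha and a > occ_alpha[counter]: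
--             counter += 1
--         bins_alpha[counter].append(a)
--
--     counter = 0
--     for a in vir_beta:
--         while counter < num_occ_beta and a > occ_beta[counter]:
--             counter += 1
--         bins_beta[counter].append(a)
--
--     output = []
--     for i_a in range(num_occ_alpha):
--         # i_a is the position in the occ_alpha_indices
--         for i_b in range(num_occ_beta):
--             # i_b is the position in the occ_beta_indices
--             for j_a in range(num_occ_alpha + 1):
--                 # j_a is the position of the spaces beween occ_alpha_indices
--                 # 0 is the space before index 0
--                 # 1 is the space between indices 0 and 1,
--                 # n is the space after n-1
--                 if not bins_alpha[j_a]: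
--                     continue
--                 output_j_b = []
--                 for j_b in range(num_occ_beta + 1):
--                     # j_b is the position of the spaces beween occ_beta_indices
--                     # 0 is the space before index 0
--                     # 1 is the space between indices 0 and 1,
--                     # n is the space after n-1
--                     if not bins_beta[j_b]:
--                         continue
--                     # num_jumps = i_a + i_b + num_occ_alpha - 1
--                     # num_jumps += j_b + num_occ_alpha - 1 + j_a
--                     num_jumps = i_a + i_b + j_b + j_a
--                     if j_a > i_a:
--                         num_jumps -= 1
--                     if j_b > i_b:
--                         num_jumps -= 1
--                     if num_jumps % 2 == 0:
--                         output_j_b += [1] * len(bins_beta[j_b])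
--                     else:
--                         output_j_b += [-1] * len(bins_beta[j_b])
--                 output += output_j_b * len(bins_alpha[j_a])
--     return output
-- ===== SOURCE B (Python) =====
-- def _jumps(occ, vir):
--     # running counter: for each v in vir, the space index it falls into
--     c, n, out = 0, len(occ), []
--     for a in vir:
--         while c < n and a > occ[c]:
--             c += 1
--         out.append(c)
--     return out
--
--
-- def sign_excite_two_ab(occ_alpha, occ_beta, vir_alpha, vir_beta):
--     ja = _jumps(occ_alpha, vir_alpha)
--     jb = _jumps(occ_beta, vir_beta)
--     out = []
--     for i_a in range(len(occ_alpha)):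
--         sa = [1 if (i_a + j - (j > i_a)) % 2 == 0 else -1 for j in ja]
--         for i_b in range(len(occ_beta)):
--             sb = [1 if (i_b + j - (j > i_b)) % 2 == 0 else -1 for j in jb]
--             for x in sa:
--                 for y in sb:
--                     out.append(x * y)
--     return out
-- ===== Notes on version B (the rewrite author's own statement) =====
-- stated objective: simpler
-- what changed: B drops A's bins table and batched list-multiplication appends: it computes one jump index per virtual orbital with a running counter, factors each sign into an alpha factor times a beta factor, and emits the products directly with nested loops.
import Mathlib
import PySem

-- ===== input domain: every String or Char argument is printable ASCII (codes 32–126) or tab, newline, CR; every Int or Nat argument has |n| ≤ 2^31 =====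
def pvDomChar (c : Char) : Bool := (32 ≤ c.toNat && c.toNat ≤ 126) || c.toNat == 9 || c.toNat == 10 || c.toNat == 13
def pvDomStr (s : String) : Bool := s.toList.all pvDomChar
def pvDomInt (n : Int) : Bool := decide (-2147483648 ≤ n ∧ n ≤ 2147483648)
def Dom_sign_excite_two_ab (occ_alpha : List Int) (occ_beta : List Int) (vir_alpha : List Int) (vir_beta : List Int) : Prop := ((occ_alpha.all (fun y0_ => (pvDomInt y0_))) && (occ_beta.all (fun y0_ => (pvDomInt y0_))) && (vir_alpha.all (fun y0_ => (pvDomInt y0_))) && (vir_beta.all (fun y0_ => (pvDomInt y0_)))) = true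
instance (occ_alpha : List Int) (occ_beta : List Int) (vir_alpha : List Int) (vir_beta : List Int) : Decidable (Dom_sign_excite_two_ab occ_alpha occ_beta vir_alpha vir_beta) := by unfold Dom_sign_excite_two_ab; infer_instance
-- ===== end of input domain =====

-- B replaces A's bins table and batched list-multiplication appends by a factored
-- per-element jump list and per-index sign lists combined with a product (simpler decomposition).

-- ===== PORT A =====
-- the `while counter < n and a > occ[counter]` loop, shared verbatim by both Pythons
def pvAdvance (occ : List Int) (c : Nat) (a : Int) : Nat :=
  if _h : c < occ.length ∧ occ.getD c 0 < a then pvAdvance occ (c + 1) a else c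
termination_by occ.length - c
decreasing_by omega

-- `bins_alpha` / `bins_beta` construction of A
def pvBinsStep (occ : List Int) (s : Nat × List (List Int)) (a : Int) : Nat × List (List Int) :=
  let c := pvAdvance occ s.1 a
  (c, s.2.set c ((s.2.getD c []) ++ [a]))

def pvBins (occ : List Int) (vir : List Int) : List (List Int) :=
  (vir.foldl (pvBinsStep occ) (0, List.replicate (occ.length + 1) ([] : List Int))).2

def sign_excite_two_ab (occ_alpha : List Int) (occ_beta : List Int) (vir_alpha : List Int) (vir_beta : List Int) : List Int :=
  let na := occ_alpha.length
  let nb := occ_beta.length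
  let binsA := pvBins occ_alpha vir_alpha
  let binsB := pvBins occ_beta vir_beta
  (List.range na).foldl (fun out (ia : Nat) =>
    (List.range nb).foldl (fun out (ib : Nat) =>
      (List.range (na + 1)).foldl (fun out (ja : Nat) =>
        if (binsA.getD ja []) = [] then out
        else
          let ojb := (List.range (nb + 1)).foldl (fun ojb (jb : Nat) =>
            if (binsB.getD jb []) = [] then ojb
            else
              let num_jumps : Int := (ia : Int) + (ib : Int) + (jb : Int) + (ja : Int)
                - (if ja > ia then 1 else 0) - (if jb > ib then 1 else 0)
              if num_jumps % 2 = 0 then ojb ++ List.replicate (binsB.getD jb []).length (1 : Int)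
              else ojb ++ List.replicate (binsB.getD jb []).length (-1 : Int)) []
          out ++ (List.replicate (binsA.getD ja []).length ojb).flatten) out) out) []

-- ===== PORT B =====
-- `_jumps` of Source B (its inner while loop is pvAdvance, shared with A)
def pvJumps (occ : List Int) (c : Nat) (vir : List Int) : List Nat :=
  match vir with
  | [] => []
  | a :: rest =>
    let c' := pvAdvance occ c a
    c' :: pvJumps occ c' rest

def pvSgn (i j : Nat) : Int :=
  if ((i : Int) + (j : Int) - (if j > i then 1 else 0)) % 2 = 0 then 1 else -1

def sign_excite_two_ab_alt (occ_alpha : List Int) (occ_beta : List Int) (vir_alpha : List Int) (vir_beta : List Int) : List Int :=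
  let ja := pvJumps occ_alpha 0 vir_alpha
  let jb := pvJumps occ_beta 0 vir_beta
  (List.range occ_alpha.length).foldl (fun out ia =>
    let sa := ja.map (fun j => pvSgn ia j)
    (List.range occ_beta.length).foldl (fun out ib =>
      let sb := jb.map (fun j => pvSgn ib j)
      sa.foldl (fun out x => sb.foldl (fun o y => o ++ [x * y]) out) out) out) []

-- ===== PRECONDITION & SPEC =====
def Spec_sign_excite_two_ab (occ_alpha : List Int) (occ_beta : List Int) (vir_alpha : List Int) (vir_beta : List Int) (out : List Int) : Prop := out = sign_excite_two_ab_alt occ_alpha occ_beta vir_alpha vir_beta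
instance (occ_alpha : List Int) (occ_beta : List Int) (vir_alpha : List Int) (vir_beta : List Int) (out : List Int) : Decidable (Spec_sign_excite_two_ab occ_alpha occ_beta vir_alpha vir_beta out) := by unfold Spec_sign_excite_two_ab; infer_instance

-- ===== CLAIM (what is proved, stated in full; the proofs are below) =====
def Claim_equal_sign_excite_two_ab : Prop := ∀ (occ_alpha : List Int) (occ_beta : List Int) (vir_alpha : List Int) (vir_beta : List Int), Dom_sign_excite_two_ab occ_alpha occ_beta vir_alpha vir_beta → Spec_sign_excite_two_ab occ_alpha occ_beta vir_alpha vir_beta (sign_excite_two_ab occ_alpha occ_beta vir_alpha vir_beta)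

-- ===== LEMMAS AND PROOFS =====

-- the joined output A extracts from a bins table, for a block function f on space indices
def pvJoinOut (bins : List (List Int)) (m : Nat) (f : Nat → List Int) : List Int :=
  (List.range m).flatMap (fun j => (List.replicate (bins.getD j []).length (f j)).flatten)

lemma pvAdvance_ge (occ : List Int) (c : Nat) (a : Int) : c ≤ pvAdvance occ c a := by
  unfold pvAdvance
  split
  · exact le_trans (Nat.le_succ c) (pvAdvance_ge occ (c + 1) a)
  · exact le_refl c
termination_by occ.length - c
decreasing_by omega

lemma pvAdvance_le (occ : List Int) (c : Nat) (a : Int) (h : c ≤ occ.length) :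
    pvAdvance occ c a ≤ occ.length := by
  unfold pvAdvance
  split
  · next hc => exact pvAdvance_le occ (c + 1) a hc.1
  · exact h
termination_by occ.length - c
decreasing_by omega

lemma flatten_replicate_succ {α : Type} (k : Nat) (x : List α) :
    (List.replicate (k + 1) x).flatten = (List.replicate k x).flatten ++ x := by
  rw [List.replicate_succ', List.flatten_append]
  simp

lemma getD_set_ne (bins : List (List Int)) (c j : Nat) (x : List Int) (h : c ≠ j) :
    (bins.set c x).getD j [] = bins.getD j [] := by
  simp [List.getD, List.getElem?_set_ne h]

lemma getD_set_self (bins : List (List Int)) (c : Nat) (x : List Int) (h : c < bins.length) :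
    (bins.set c x).getD c [] = x := by
  simp [List.getD, h]

lemma pvJoinOut_set (bins : List (List Int)) (n c : Nat) (a : Int) (f : Nat → List Int)
    (hlen : bins.length = n + 1) (hc : c ≤ n)
    (hemp : ∀ j, c < j → bins.getD j [] = []) :
    pvJoinOut (bins.set c ((bins.getD c []) ++ [a])) (n + 1) f
      = pvJoinOut bins (n + 1) f ++ f c := by
  unfold pvJoinOut
  have hsplit : n + 1 = (c + 1) + (n - c) := by omega
  rw [hsplit, List.range_add, List.flatMap_append, List.flatMap_append]
  have htail : ∀ (b : List (List Int)), (∀ j, c < j → b.getD j [] = []) →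
      ((List.range (n - c)).map (fun x => c + 1 + x)).flatMap
        (fun j => (List.replicate (b.getD j []).length (f j)).flatten) = [] := by
    intro b hb
    apply List.flatMap_eq_nil_iff.mpr
    intro j hj
    simp only [List.mem_map, List.mem_range] at hj
    obtain ⟨x, _, rfl⟩ := hj
    rw [hb _ (by omega)]
    simp
  have hemp' : ∀ j, c < j → (bins.set c ((bins.getD c []) ++ [a])).getD j [] = [] := by
    intro j hj
    rw [getD_set_ne _ _ _ _ (by omega)]
    exact hemp j hj
  rw [htail _ hemp', htail _ hemp, List.append_nil, List.append_nil]
  rw [List.range_succ, List.flatMap_append, List.flatMap_append]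
  have hhead : (List.range c).flatMap
      (fun j => (List.replicate ((bins.set c ((bins.getD c []) ++ [a])).getD j []).length (f j)).flatten)
      = (List.range c).flatMap (fun j => (List.replicate (bins.getD j []).length (f j)).flatten) := by
    apply List.flatMap_congr  -- may not exist; fallback below
    intro j hj
    simp only [List.mem_range] at hj
    rw [getD_set_ne _ _ _ _ (by omega)]
  rw [hhead]
  rw [List.append_assoc]
  congr 1
  simp only [List.flatMap_cons, List.flatMap_nil, List.append_nil]
  rw [getD_set_self _ _ _ (by omega), List.length_append, List.length_cons, List.length_nil]
  exact flatten_replicate_succ _ _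

-- the bins fold of A, read through pvJoinOut, is the jumps list of B flat-mapped
lemma pvBins_joinOut (occ : List Int) (f : Nat → List Int) :
    ∀ (vir : List Int) (c : Nat) (bins : List (List Int)),
      bins.length = occ.length + 1 → c ≤ occ.length →
      (∀ j, c < j → bins.getD j [] = []) →
      pvJoinOut (vir.foldl (pvBinsStep occ) (c, bins)).2 (occ.length + 1) f
        = pvJoinOut bins (occ.length + 1) f ++ (pvJumps occ c vir).flatMap f := by
  intro vir
  induction vir with
  | nil => intro c bins _ _ _; simp [pvJumps]
  | cons a rest ih =>
    intro c bins hlen hc hemp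
    rw [List.foldl_cons]
    have hc' := pvAdvance_le occ c a hc
    have hcge := pvAdvance_ge occ c a
    rw [show pvBinsStep occ (c, bins) a
      = (pvAdvance occ c a, bins.set (pvAdvance occ c a) (bins.getD (pvAdvance occ c a) [] ++ [a])) from rfl]
    rw [ih (pvAdvance occ c a) _ (by simp [hlen]) hc'
      (by
        intro j hj
        rw [getD_set_ne _ _ _ _ (by omega)]
        exact hemp j (by omega))]
    rw [pvJoinOut_set bins occ.length (pvAdvance occ c a) a f hlen hc' (fun j hj => hemp j (by omega))]
    simp [pvJumps, List.flatMap_cons, List.append_assoc]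

lemma getD_replicate_nil (n j : Nat) : (List.replicate n ([] : List Int)).getD j [] = [] := by
  rcases Nat.lt_or_ge j n with h | h
  · simp [List.getD, h]
  · have hlen : (List.replicate n ([] : List Int)).length ≤ j := by simpa using h
    simp [List.getD, List.getElem?_eq_none hlen]

lemma pvJoinOut_empty (n m : Nat) (f : Nat → List Int) :
    pvJoinOut (List.replicate n ([] : List Int)) m f = [] := by
  unfold pvJoinOut
  apply List.flatMap_eq_nil_iff.mpr
  intro j _
  rw [getD_replicate_nil]
  simp

lemma pvBins_joinOut' (occ vir : List Int) (f : Nat → List Int) :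
    pvJoinOut (pvBins occ vir) (occ.length + 1) f = (pvJumps occ 0 vir).flatMap f := by
  unfold pvBins
  rw [pvBins_joinOut occ f vir 0 _ (by simp) (by omega)
    (fun j _ => getD_replicate_nil _ j)]
  rw [pvJoinOut_empty, List.nil_append]

lemma repl_singleton (k : Nat) (x : Int) :
    List.replicate k x = (List.replicate k [x]).flatten := by
  induction k with
  | zero => simp
  | succ k ih =>
    rw [List.replicate_succ, List.replicate_succ, List.flatten_cons, ih]
    rfl

lemma foldl_bins2 (bins : List (List Int)) (m : Nat) (F : Nat → List Int) (init : List Int) :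
    (List.range m).foldl (fun o j =>
        if bins.getD j [] = [] then o
        else o ++ (List.replicate (bins.getD j []).length (F j)).flatten) init
      = init ++ pvJoinOut bins m F := by
  refine (PySem.List.foldl_congr_mem _ _
    (fun o j => o ++ (List.replicate (bins.getD j []).length (F j)).flatten) _ ?_).trans ?_
  · intro acc j _
    by_cases he : bins.getD j [] = []
    · rw [if_pos he]
      show acc = acc ++ (List.replicate (bins.getD j []).length (F j)).flatten
      rw [he]
      simp
    · rw [if_neg he]
  · rw [PySem.List.foldl_append_eq_flatMap]
    rfl

def pvSgn2 (ia ib ja jb : Nat) : Int :=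
  if (((ia : Int) + (ib : Int) + (jb : Int) + (ja : Int)
      - (if ja > ia then 1 else 0) - (if jb > ib then 1 else 0)) % 2 = 0)
  then 1 else -1

-- A's full result as nested flatMaps over the jump lists
lemma portA_flatMap (occ_alpha occ_beta vir_alpha vir_beta : List Int) :
    sign_excite_two_ab occ_alpha occ_beta vir_alpha vir_beta
      = (List.range occ_alpha.length).flatMap (fun ia =>
          (List.range occ_beta.length).flatMap (fun ib =>
            (pvJumps occ_alpha 0 vir_alpha).flatMap (fun ja =>
              (pvJumps occ_beta 0 vir_beta).map (fun jb => pvSgn2 ia ib ja jb)))) := by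
  unfold sign_excite_two_ab
  simp only
  have hbeta : ∀ ia ib ja : Nat,
      (List.range (occ_beta.length + 1)).foldl (fun ojb (jb : Nat) =>
        if (pvBins occ_beta vir_beta).getD jb [] = [] then ojb
        else
          if (((ia : Int) + (ib : Int) + (jb : Int) + (ja : Int)
              - (if ja > ia then 1 else 0) - (if jb > ib then 1 else 0)) % 2 = 0)
          then ojb ++ List.replicate ((pvBins occ_beta vir_beta).getD jb []).length (1 : Int)
          else ojb ++ List.replicate ((pvBins occ_beta vir_beta).getD jb []).length (-1 : Int)) []
      = (pvJumps occ_beta 0 vir_beta).flatMap (fun jb => [pvSgn2 ia ib ja jb]) := by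
    intro ia ib ja
    refine (PySem.List.foldl_congr_mem _ _
      (fun o (jb : Nat) => if (pvBins occ_beta vir_beta).getD jb [] = [] then o
        else o ++ (List.replicate ((pvBins occ_beta vir_beta).getD jb []).length
          ([pvSgn2 ia ib ja jb])).flatten) _ ?_).trans ?_
    · intro acc jb _
      by_cases he : (pvBins occ_beta vir_beta).getD jb [] = []
      · simp only [if_pos he]
      · simp only [if_neg he]
        rw [← repl_singleton]
        unfold pvSgn2
        split_ifs <;> rfl
    · rw [foldl_bins2, pvBins_joinOut', List.nil_append]
  simp only [hbeta]
  simp only [foldl_bins2, pvBins_joinOut']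
  simp only [PySem.List.foldl_append_eq_flatMap]
  simp only [List.nil_append, ← List.map_eq_flatMap]

lemma portB_flatMap (occ_alpha occ_beta vir_alpha vir_beta : List Int) :
    sign_excite_two_ab_alt occ_alpha occ_beta vir_alpha vir_beta
      = (List.range occ_alpha.length).flatMap (fun ia =>
          (List.range occ_beta.length).flatMap (fun ib =>
            (pvJumps occ_alpha 0 vir_alpha).flatMap (fun ja =>
              (pvJumps occ_beta 0 vir_beta).map (fun jb => pvSgn ia ja * pvSgn ib jb)))) := by
  unfold sign_excite_two_ab_alt
  simp only [PySem.List.foldl_append_singleton_eq_map, PySem.List.foldl_append_eq_flatMap,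
    List.flatMap_map, List.map_map]
  simp only [List.nil_append, Function.comp_def]

lemma sgn_mul (ia ja ib jb : Nat) :
    pvSgn ia ja * pvSgn ib jb = pvSgn2 ia ib ja jb := by
  unfold pvSgn pvSgn2
  split_ifs <;> norm_num <;> omega

-- ===== VERDICT (by name: the statement is the Claim_ definition above) =====
theorem sign_excite_two_ab_spec : Claim_equal_sign_excite_two_ab := by
  intro occ_alpha occ_beta vir_alpha vir_beta _
  unfold Spec_sign_excite_two_ab
  rw [portA_flatMap, portB_flatMap]
  simp only [sgn_mul]
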